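-- pv_equiv track=rewrite | github.com/pypi-data/pypi-mirror-74 | packages/xlist/xlist-0.0.8.tar.gz/xlist-0.0.8/xlist/index.py | index_which_not
-- ===== SOURCE A (Python) =====
-- def index_which_not(ol,value,which):
--     length = ol.__len__()
--     seq = -1
--     for i in range(0,length):
--         if(value == ol[i]):
--             pass
--         else:
--             seq = seq + 1
--             if(seq == which):
--                 return(i)
--             else:
--                 pass
--     return(None)
-- ===== SOURCE B (Python) =====
-- def index_which_not(ol, value, which):
--     indices = [i for i, x in enumerate(ol) if value != x]
--     if 0 <= which < len(indices):
--         return indices[which]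
--     return None
-- ===== Notes on version B (the rewrite author's own statement) =====
-- stated objective: simpler
-- what changed: Replaced the counter-driven early-exit scan (seq counter compared against which) by a comprehension that collects all qualifying indices followed by a single bounds-checked lookup indices[which].
import Mathlib
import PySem

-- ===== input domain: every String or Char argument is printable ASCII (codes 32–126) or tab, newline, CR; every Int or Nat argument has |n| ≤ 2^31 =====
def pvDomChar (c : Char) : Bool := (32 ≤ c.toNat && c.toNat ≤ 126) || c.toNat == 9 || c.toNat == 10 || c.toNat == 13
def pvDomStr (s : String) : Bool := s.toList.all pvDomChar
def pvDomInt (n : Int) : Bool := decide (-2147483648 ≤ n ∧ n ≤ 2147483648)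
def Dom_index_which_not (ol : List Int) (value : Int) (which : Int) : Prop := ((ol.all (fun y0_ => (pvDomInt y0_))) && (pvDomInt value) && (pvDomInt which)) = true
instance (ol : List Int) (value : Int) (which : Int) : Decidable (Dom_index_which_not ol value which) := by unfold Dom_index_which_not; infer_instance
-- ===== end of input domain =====

-- B replaces A's counter-driven early-exit scan by collecting all qualifying indices and a single bounds-checked lookup (simpler).


-- ===== PORT A =====
-- A's loop: scan ol with index i and counter seq (starting at -1); on a non-equal
-- element bump seq and return i when seq == which.
def goA (value which : Int) : List Int → Int → Int → Option Int
  | [], _, _ => none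
  | x :: xs, i, seq =>
    if value = x then goA value which xs (i + 1) seq
    else if seq + 1 = which then some i
    else goA value which xs (i + 1) (seq + 1)

def index_which_not (ol : List Int) (value : Int) (which : Int) : Option Int :=
  goA value which ol 0 (-1)

-- ===== PORT B =====
-- indices = [i for i, x in enumerate(ol) if value != x]; return indices[which] if in bounds else None
def index_which_not_alt (ol : List Int) (value : Int) (which : Int) : Option Int :=
  let indices : List Int :=
    ((PySem.List.enumerate ol).filter (fun p => decide (value ≠ p.2))).map (fun p => p.1)
  if 0 ≤ which ∧ which < (indices.length : Int) then indices[which.toNat]? else none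

-- ===== PRECONDITION & SPEC =====
def Spec_index_which_not (ol : List Int) (value : Int) (which : Int) (out : Option Int) : Prop := out = index_which_not_alt ol value which
instance (ol : List Int) (value : Int) (which : Int) (out : Option Int) : Decidable (Spec_index_which_not ol value which out) := by unfold Spec_index_which_not; infer_instance

-- ===== CLAIM (what is proved, stated in full; the proofs are below) =====
def Claim_equal_index_which_not : Prop := ∀ (ol : List Int) (value : Int) (which : Int), Dom_index_which_not ol value which → Spec_index_which_not ol value which (index_which_not ol value which)

-- ===== LEMMAS AND PROOFS =====

-- B's qualifying-index table for the suffix enumerated from i.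
def idxTab (value : Int) (xs : List Int) (i : Int) : List Int :=
  ((PySem.List.enumerate xs i).filter (fun p => decide (value ≠ p.2))).map (fun p => p.1)

-- integer lookup with the negative side mapped to none
def lookupI (l : List Int) (k : Int) : Option Int :=
  if 0 ≤ k then l[k.toNat]? else none

theorem idxTab_nil (value i : Int) : idxTab value [] i = [] := by
  simp [idxTab, PySem.List.enumerate_nil]

theorem idxTab_cons (value x : Int) (xs : List Int) (i : Int) :
    idxTab value (x :: xs) i =
      if value = x then idxTab value xs (i + 1) else i :: idxTab value xs (i + 1) := by
  by_cases h : value = x <;> simp [idxTab, PySem.List.enumerate_cons, h]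

theorem goA_eq_lookup (value which : Int) (xs : List Int) (i seq : Int) :
    goA value which xs i seq = lookupI (idxTab value xs i) (which - seq - 1) := by
  induction xs generalizing i seq with
  | nil => simp [goA, idxTab_nil, lookupI]
  | cons x xs ih =>
    rw [goA, idxTab_cons]
    by_cases h : value = x
    · subst h; simp [ih]
    · simp only [h, if_false]
      by_cases hw : seq + 1 = which
      · have : which - seq - 1 = 0 := by omega
        simp [hw, this, lookupI]
      · have hne : seq + 1 ≠ which := hw
        simp only [hne, if_false, ih]
        unfold lookupI
        by_cases hk : 0 ≤ which - seq - 1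
        · have hk' : 0 ≤ which - (seq + 1) - 1 := by omega
          -- which - seq - 1 > 0 here since it is ≠ 0 would need hw; actually could be 0? no: = 0 ↔ which = seq+1
          have hpos : 0 < which - seq - 1 := by omega
          have : (which - seq - 1).toNat = (which - (seq + 1) - 1).toNat + 1 := by omega
          simp only [this, List.getElem?_cons_succ]
          rw [if_pos (by omega), if_pos (by omega)]
        · have hk' : ¬ 0 ≤ which - (seq + 1) - 1 := by omega
          rw [if_neg (by omega), if_neg (by omega)]

-- ===== VERDICT (by name: the statement is the Claim_ definition above) =====
theorem index_which_not_spec : Claim_equal_index_which_not := by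
  intro ol value which _
  unfold Spec_index_which_not index_which_not index_which_not_alt
  rw [goA_eq_lookup]
  have h0 : which - (-1) - 1 = which := by omega
  rw [h0]
  unfold lookupI idxTab
  by_cases h : 0 ≤ which
  · by_cases hlt : which < ((((PySem.List.enumerate ol 0).filter (fun p => decide (value ≠ p.2))).map (fun p => p.1)).length : Int)
    · simp [h, hlt]
    · have : (((PySem.List.enumerate ol 0).filter (fun p => decide (value ≠ p.2))).map (fun p => p.1))[which.toNat]? = none := by
        apply List.getElem?_eq_none
        omega
      simp [h, hlt, this]
  · simp [h]
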